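-- pv_equiv track=rewrite | github.com/whyj107/Algorithm | CodeWar/20201117_ ORing arrays.py | or_arrays0
-- ===== SOURCE A (Python) =====
-- def or_arrays0(arr1, arr2, n=0):
--     result = []
--     for i in range(max(len(arr1), len(arr2))):
--         a = b = n
--         if i < len(arr1): a = arr1[i]
--         if i < len(arr2): b = arr2[i]
--         result.append(b|a)
--     return result
-- ===== SOURCE B (Python) =====
-- def or_arrays0(arr1, arr2, n=0):
--     head = [a | b for a, b in zip(arr1, arr2)]
--     tail1 = [x | n for x in arr1[len(arr2):]]
--     tail2 = [x | n for x in arr2[len(arr1):]]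
--     return head + tail1 + tail2
-- ===== Notes on version B (the rewrite author's own statement) =====
-- stated objective: simpler
-- what changed: Replaces the single index loop with per-index bound checks by a zip over the common prefix plus one comprehension per tail OR'd with n.
import Mathlib
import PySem

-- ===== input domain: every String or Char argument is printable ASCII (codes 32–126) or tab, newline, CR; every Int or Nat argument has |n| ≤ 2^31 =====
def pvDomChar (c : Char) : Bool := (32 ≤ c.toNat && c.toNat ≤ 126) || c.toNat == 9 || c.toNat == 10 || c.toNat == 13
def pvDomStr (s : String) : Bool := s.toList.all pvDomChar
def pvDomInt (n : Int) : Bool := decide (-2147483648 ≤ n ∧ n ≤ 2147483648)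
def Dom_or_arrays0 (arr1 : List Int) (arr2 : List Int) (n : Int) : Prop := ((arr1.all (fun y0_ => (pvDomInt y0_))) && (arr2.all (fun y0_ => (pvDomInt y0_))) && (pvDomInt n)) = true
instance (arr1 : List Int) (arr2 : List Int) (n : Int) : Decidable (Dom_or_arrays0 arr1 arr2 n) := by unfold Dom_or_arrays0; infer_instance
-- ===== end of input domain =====

-- B computes the element-wise OR as a zip over the common prefix plus one tail pass OR'd with n, instead of A's single index loop with per-index bound checks; same cost, simpler shape.

-- ===== PORT A =====
-- literal port of A: loop i over range(max(len1,len2)), a/b default to n, overwritten when in range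
def or_arrays0 (arr1 : List Int) (arr2 : List Int) (n : Int) : List Int :=
  (PySem.List.pyRange 0 ((max arr1.length arr2.length : Nat) : Int) 1).foldl
    (fun result i =>
      let a : Int := if i < (arr1.length : Int) then PySem.List.pyGetD arr1 i n else n
      let b : Int := if i < (arr2.length : Int) then PySem.List.pyGetD arr2 i n else n
      result ++ [PySem.Int.bor b a]) []

-- ===== PORT B =====
-- literal port of B: zip prefix, then each slice arr[len(other):] (= drop) OR'd with n
def or_arrays0_alt (arr1 : List Int) (arr2 : List Int) (n : Int) : List Int :=
  let head := List.zipWith (fun a b => PySem.Int.bor a b) arr1 arr2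
  let tail1 := (arr1.drop arr2.length).map (fun x => PySem.Int.bor x n)
  let tail2 := (arr2.drop arr1.length).map (fun x => PySem.Int.bor x n)
  head ++ tail1 ++ tail2

-- ===== PRECONDITION & SPEC =====
def Spec_or_arrays0 (arr1 : List Int) (arr2 : List Int) (n : Int) (out : List Int) : Prop := out = or_arrays0_alt arr1 arr2 n
instance (arr1 : List Int) (arr2 : List Int) (n : Int) (out : List Int) : Decidable (Spec_or_arrays0 arr1 arr2 n out) := by unfold Spec_or_arrays0; infer_instance

-- ===== CLAIM (what is proved, stated in full; the proofs are below) =====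
def Claim_equal_or_arrays0 : Prop := ∀ (arr1 : List Int) (arr2 : List Int) (n : Int), Dom_or_arrays0 arr1 arr2 n → Spec_or_arrays0 arr1 arr2 n (or_arrays0 arr1 arr2 n)

-- ===== LEMMAS AND PROOFS =====

-- the guarded lookup in A is just getD with default n
lemma guarded_getD (xs : List Int) (n : Int) (k : Nat) :
    (if ((k : Int)) < (xs.length : Int) then PySem.List.pyGetD xs (k : Int) n else n) = xs.getD k n := by
  rw [PySem.List.pyGetD_natCast]
  split_ifs with h
  · rfl
  · rw [List.getD_eq_getElem?_getD, List.getElem?_eq_none (by omega)]; rfl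

-- A in closed map form over Nat range
lemma or_arrays0_eq_map (arr1 arr2 : List Int) (n : Int) :
    or_arrays0 arr1 arr2 n =
      (List.range (max arr1.length arr2.length)).map
        (fun k => PySem.Int.bor (arr2.getD k n) (arr1.getD k n)) := by
  unfold or_arrays0
  rw [PySem.List.pyRange_one]
  simp only [sub_zero, Int.toNat_natCast, List.foldl_map,
    PySem.List.foldl_append_singleton_eq_map, List.nil_append]
  refine List.map_congr_left (fun k _ => ?_)
  simp only [zero_add, guarded_getD]

-- the map form equals B, by induction on both lists
lemma map_eq_alt (arr1 arr2 : List Int) (n : Int) :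
    (List.range (max arr1.length arr2.length)).map
        (fun k => PySem.Int.bor (arr2.getD k n) (arr1.getD k n))
      = or_arrays0_alt arr1 arr2 n := by
  induction arr1 generalizing arr2 with
  | nil =>
    simp only [or_arrays0_alt, List.length_nil, List.zipWith_nil_left, List.drop_zero,
      Nat.max_eq_right (Nat.zero_le _), List.nil_append, List.drop_nil, List.map_nil,
      List.append_nil]
    induction arr2 with
    | nil => simp
    | cons y ys ih =>
      rw [List.length_cons, List.range_succ_eq_map, List.map_cons, List.map_map, List.map_cons]
      refine congrArg₂ _ rfl ?_
      simpa using ih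
  | cons x xs ih =>
    cases arr2 with
    | nil =>
      simp only [or_arrays0_alt, List.length_nil, List.zipWith_nil_right, List.drop_zero,
        Nat.max_eq_left (Nat.zero_le _), List.drop_nil, List.map_nil, List.append_nil,
        List.nil_append]
      induction (x :: xs) with
      | nil => simp
      | cons z zs ihz =>
        rw [List.length_cons, List.range_succ_eq_map, List.map_cons, List.map_map, List.map_cons]
        refine congrArg₂ _ (PySem.Int.bor_comm _ _) ?_
        simpa using ihz
    | cons y ys =>
      have hmax : max (x :: xs).length (y :: ys).length = max xs.length ys.length + 1 := by
        simp [List.length_cons, Nat.succ_max_succ]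
      rw [hmax, List.range_succ_eq_map, List.map_cons, List.map_map]
      have htail : ((List.range (max xs.length ys.length)).map
          (fun k => PySem.Int.bor (ys.getD k n) (xs.getD k n))) = or_arrays0_alt xs ys n := by
        simpa using ih ys
      calc (fun k => PySem.Int.bor ((y :: ys).getD k n) ((x :: xs).getD k n)) 0 ::
            (List.range (max xs.length ys.length)).map
              ((fun k => PySem.Int.bor ((y :: ys).getD k n) ((x :: xs).getD k n)) ∘ Nat.succ)
          = PySem.Int.bor y x ::
            (List.range (max xs.length ys.length)).map
              (fun k => PySem.Int.bor (ys.getD k n) (xs.getD k n)) := by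
            refine congrArg₂ _ rfl (List.map_congr_left (fun k _ => ?_))
            simp [List.getD]
        _ = PySem.Int.bor y x :: or_arrays0_alt xs ys n := by rw [htail]
        _ = or_arrays0_alt (x :: xs) (y :: ys) n := by
            simp [or_arrays0_alt, PySem.Int.bor_comm]

-- ===== VERDICT (by name: the statement is the Claim_ definition above) =====
theorem or_arrays0_spec : Claim_equal_or_arrays0 := by
  intro arr1 arr2 n _
  unfold Spec_or_arrays0
  rw [or_arrays0_eq_map, map_eq_alt]
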